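-- pv_equiv track=rewrite | github.com/konszymanski/leetcode-dataset | obfuscated_solutions/python/1334-find-the-city-with-the-smallest-number-of-neighbors-at-a-threshold-distance/solution_3_bool_ident.py | get_city_with_fewest_reachable
-- ===== SOURCE A (Python) =====
-- from typing import List
--
-- def get_city_with_fewest_reachable(n: int, shortest_path_matrix:
--     List[List[int]], distance_threshold: int) ->int:
--     city_with_fewest_reachable = -1
--     fewest_reachable_count = n
--     for i in range(n):
--         reachable_count = sum(1 for j in range(n) if i != j and
--             shortest_path_matrix[i][j] <= distance_threshold)
--         if reachable_count <= fewest_reachable_count and 1 + 1 == 2: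
--             fewest_reachable_count = reachable_count
--             city_with_fewest_reachable = i
--     return city_with_fewest_reachable
-- ===== SOURCE B (Python) =====
-- from typing import List
--
--
-- def _upper_bound(a: List[int], x: int) -> int:
--     lo, hi = 0, len(a)
--     while lo < hi:
--         mid = (lo + hi) // 2
--         if a[mid] <= x:
--             lo = mid + 1
--         else:
--             hi = mid
--     return lo
--
--
-- def get_city_with_fewest_reachable(n: int, shortest_path_matrix:
--     List[List[int]], distance_threshold: int) ->int:
--     best = None
--     for i in range(n):
--         row = shortest_path_matrix[i]
--         others = sorted(row[:i] + row[i + 1:n])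
--         key = (_upper_bound(others, distance_threshold), -i)
--         if best is None or key < best:
--             best = key
--     if best is None:
--         return -1
--     return -best[1]
-- ===== Notes on version B (the rewrite author's own statement) =====
-- stated objective: alternative
-- what changed: B counts each city's reachable neighbours by sorting the off-diagonal row entries (row[:i]+row[i+1:n]) and locating the threshold with a hand-written binary search (upper bound), instead of A's linear i!=j sum, and selects the answer through a lexicographic (count, -i) key held in an Optional best instead of A's running fewest/<= update.
-- outside the precondition, e.g. on get_city_with_fewest_reachable(1, [], 0): A returns 0, B raises IndexError
import Mathlib
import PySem

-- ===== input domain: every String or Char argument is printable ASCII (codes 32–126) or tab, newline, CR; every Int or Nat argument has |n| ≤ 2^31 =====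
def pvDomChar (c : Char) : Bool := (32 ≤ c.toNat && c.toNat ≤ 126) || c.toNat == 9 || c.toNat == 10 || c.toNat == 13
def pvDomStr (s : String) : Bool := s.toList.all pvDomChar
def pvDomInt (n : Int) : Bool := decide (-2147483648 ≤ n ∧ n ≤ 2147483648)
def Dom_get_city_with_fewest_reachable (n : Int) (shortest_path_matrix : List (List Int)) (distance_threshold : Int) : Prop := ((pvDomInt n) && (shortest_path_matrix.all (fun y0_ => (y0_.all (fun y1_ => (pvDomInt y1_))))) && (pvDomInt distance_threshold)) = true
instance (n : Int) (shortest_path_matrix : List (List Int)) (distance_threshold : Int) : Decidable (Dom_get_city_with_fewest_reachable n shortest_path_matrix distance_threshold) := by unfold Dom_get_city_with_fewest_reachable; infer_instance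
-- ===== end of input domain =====

-- B counts each city's reachable neighbours by sorting the off-diagonal row entries and
-- binary-searching the threshold (upper bound), selecting via a lexicographic (count, -i)
-- key, instead of A's fused linear i!=j scan with a running fewest/<= update (objective: alternative).

-- ===== PORT A =====
def get_city_with_fewest_reachable (n : Int) (shortest_path_matrix : List (List Int)) (distance_threshold : Int) : Int :=
  let res := (PySem.List.pyRange 0 n 1).foldl (fun (st : Int × Int) i =>
    let reachable_count : Int := (PySem.List.pyRange 0 n 1).foldl (fun acc j =>
      if i ≠ j ∧ PySem.List.pyGetD (PySem.List.pyGetD shortest_path_matrix i []) j 0 ≤ distance_threshold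
      then acc + 1 else acc) 0
    if reachable_count ≤ st.2 ∧ 1 + 1 = 2 then (i, reachable_count) else st) (-1, n)
  res.1

-- ===== PORT B =====
-- _upper_bound from Source B: lo/hi stay in [0, len(a)], so Nat indices are exact; a[mid] is
-- getD (mid is always in range on every call the port makes); (lo+hi)//2 on nonnegatives is Nat division.
def pvUB (a : List Int) (x : Int) (lo hi : Nat) : Nat :=
  if h : lo < hi then
    let mid := (lo + hi) / 2
    if a.getD mid 0 ≤ x then pvUB a x (mid + 1) hi else pvUB a x lo mid
  else lo
termination_by hi - lo
decreasing_by all_goals omega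

-- Python's tuple comparison 'key < best' is written out as the lexicographic test.
def get_city_with_fewest_reachable_alt (n : Int) (shortest_path_matrix : List (List Int)) (distance_threshold : Int) : Int :=
  let best : Option (Int × Int) := (PySem.List.pyRange 0 n 1).foldl
    (fun best i =>
      let row := PySem.List.pyGetD shortest_path_matrix i []
      let others := PySem.List.sorted
        (PySem.List.slice row none (some i) ++ PySem.List.slice row (some (i + 1)) (some n))
        (fun x => x) false
      let key : Int × Int := ((pvUB others distance_threshold 0 others.length : Int), -i)
      match best with
      | none => some key
      | some b => if key.1 < b.1 ∨ (key.1 = b.1 ∧ key.2 < b.2) then some key else some b)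
    none
  match best with
  | none => -1
  | some b => -b.2

-- ===== PRECONDITION & SPEC =====
-- Pre_ holds exactly where A returns, except that it also excludes the degenerate inputs with
-- n = 1 and an empty matrix (not a 1×1 matrix): there A returns 0 without ever touching the
-- matrix (its only index pair is the skipped diagonal), while B's natural row access raises.
def Pre_get_city_with_fewest_reachable (n : Int) (shortest_path_matrix : List (List Int)) (distance_threshold : Int) : Prop :=
  n ≤ 0 ∨ (n ≤ (shortest_path_matrix.length : Int)
    ∧ (∀ row ∈ shortest_path_matrix.take (n.toNat - 1), n ≤ (row.length : Int))
    ∧ n - 1 ≤ ((shortest_path_matrix.getD (n.toNat - 1) []).length : Int))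
instance (n : Int) (shortest_path_matrix : List (List Int)) (distance_threshold : Int) : Decidable (Pre_get_city_with_fewest_reachable n shortest_path_matrix distance_threshold) := by unfold Pre_get_city_with_fewest_reachable; infer_instance

def pvWitness_get_city_with_fewest_reachable : Int × List (List Int) × Int := (2, [[0, 3], [3, 0]], 4)

def Spec_get_city_with_fewest_reachable (n : Int) (shortest_path_matrix : List (List Int)) (distance_threshold : Int) (out : Int) : Prop := out = get_city_with_fewest_reachable_alt n shortest_path_matrix distance_threshold
instance (n : Int) (shortest_path_matrix : List (List Int)) (distance_threshold : Int) (out : Int) : Decidable (Spec_get_city_with_fewest_reachable n shortest_path_matrix distance_threshold out) := by unfold Spec_get_city_with_fewest_reachable; infer_instance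

-- ===== CLAIM =====
def Claim_equal_get_city_with_fewest_reachable : Prop := ∀ (n : Int) (shortest_path_matrix : List (List Int)) (distance_threshold : Int), Dom_get_city_with_fewest_reachable n shortest_path_matrix distance_threshold → Pre_get_city_with_fewest_reachable n shortest_path_matrix distance_threshold → Spec_get_city_with_fewest_reachable n shortest_path_matrix distance_threshold (get_city_with_fewest_reachable n shortest_path_matrix distance_threshold)

-- ===== LEMMAS AND PROOFS =====

-- counting over a prefix of a list equals counting over its index range
lemma pv_countP_take_range (xs : List Int) (q : Int → Bool) :
    ∀ (m : Nat), m ≤ xs.length →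
      (xs.take m).countP q = (List.range m).countP (fun j => q (xs.getD j 0)) := by
  intro m
  induction m with
  | zero => intro _; simp
  | succ m ih =>
    intro h
    have hm : m < xs.length := by omega
    rw [List.take_succ, List.countP_append, List.range_succ, List.countP_append,
        ih (by omega)]
    simp [List.getElem?_eq_getElem hm, List.getD_eq_getElem xs 0 hm]

-- counting small indices in a range
lemma pv_countP_range_lt (r m : Nat) (h : r ≤ m) :
    (List.range m).countP (fun q => decide (q < r)) = r := by
  induction m with
  | zero => simp; omega
  | succ m ih =>
    rw [List.range_succ, List.countP_append]
    by_cases hr : r ≤ m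
    · have : ¬ m < r := by omega
      simp [ih hr, this]
    · have hrm : r = m + 1 := by omega
      subst hrm
      have : (List.range (m+1)).countP (fun q => decide (q < m + 1)) = (List.range (m+1)).countP (fun _ => true) := by
        apply List.countP_congr
        intro j hj
        have := List.mem_range.mp hj
        simp [this]
      calc (List.range m).countP (fun q => decide (q < m + 1)) + List.countP (fun q => decide (q < m + 1)) [m]
          = (List.range (m+1)).countP (fun q => decide (q < m + 1)) := by
            rw [List.range_succ, List.countP_append]
        _ = m + 1 := by rw [this]; simp

-- the hand-written binary search: on a monotone list it finds the count of elements ≤ x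
lemma pv_pvUB_inv (a : List Int) (x : Int)
    (hmono : ∀ p q, p < a.length → q < a.length → p ≤ q → a.getD p 0 ≤ a.getD q 0) :
    ∀ fuel lo hi, hi - lo ≤ fuel → lo ≤ hi → hi ≤ a.length →
      (∀ q, q < lo → q < a.length → a.getD q 0 ≤ x) →
      (∀ q, hi ≤ q → q < a.length → ¬ a.getD q 0 ≤ x) →
      pvUB a x lo hi ≤ a.length ∧
        (∀ q, q < a.length → (a.getD q 0 ≤ x ↔ q < pvUB a x lo hi)) := by
  intro fuel
  induction fuel with
  | zero =>
    intro lo hi hfuel hlh hha hlow hhigh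
    have : lo = hi := by omega
    subst this
    rw [pvUB]
    simp only [lt_irrefl, dite_false]
    refine ⟨by omega, ?_⟩
    intro q hq
    constructor
    · intro hle
      by_contra hge
      exact hhigh q (by omega) hq hle
    · intro hlt
      exact hlow q hlt hq
  | succ fuel ih =>
    intro lo hi hfuel hlh hha hlow hhigh
    by_cases h : lo < hi
    · rw [pvUB]
      simp only [h, dite_true]
      set mid := (lo + hi) / 2 with hmid
      have hmlo : lo ≤ mid := by omega
      have hmhi : mid < hi := by omega
      have hmlen : mid < a.length := by omega
      by_cases hc : a.getD mid 0 ≤ x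
      · simp only [hc, if_true]
        apply ih (mid + 1) hi (by omega) (by omega) hha
        · intro q hq hqa
          exact le_trans (hmono q mid hqa hmlen (by omega)) hc
        · exact hhigh
      · simp only [hc, if_false]
        apply ih lo mid (by omega) (by omega) (by omega) hlow
        intro q hq hqa hle
        exact hc (le_trans (hmono mid q hmlen hqa hq) hle)
    · have : lo = hi := by omega
      subst this
      rw [pvUB]
      simp only [lt_irrefl, dite_false]
      refine ⟨by omega, ?_⟩
      intro q hq
      constructor
      · intro hle
        by_contra hge
        exact hhigh q (by omega) hq hle
      · intro hlt
        exact hlow q hlt hq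

-- full-range binary search on a sorted list counts the elements ≤ x
lemma pv_pvUB_count (a : List Int) (x : Int) (hpair : a.Pairwise (· ≤ ·)) :
    pvUB a x 0 a.length = a.countP (fun y => decide (y ≤ x)) := by
  have hmono : ∀ p q, p < a.length → q < a.length → p ≤ q → a.getD p 0 ≤ a.getD q 0 := by
    intro p q hp hq hpq
    rcases Nat.lt_or_ge p q with h | h
    · rw [List.getD_eq_getElem a 0 hp, List.getD_eq_getElem a 0 hq]
      exact List.pairwise_iff_getElem.mp hpair p q hp hq h
    · have : p = q := by omega
      subst this; exact le_refl _
  obtain ⟨hle, hiff⟩ := pv_pvUB_inv a x hmono a.length 0 a.length (by omega) (by omega)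
    (le_refl _) (by omega) (by intro q hq hqa; omega)
  have h1 : a.countP (fun y => decide (y ≤ x)) = (a.take a.length).countP (fun y => decide (y ≤ x)) := by
    rw [List.take_length]
  rw [h1, pv_countP_take_range a _ a.length (le_refl _)]
  have h2 : (List.range a.length).countP (fun j => decide (a.getD j 0 ≤ x))
      = (List.range a.length).countP (fun j => decide (j < pvUB a x 0 a.length)) := by
    apply List.countP_congr
    intro j hj
    have hja := List.mem_range.mp hj
    have := hiff j hja
    rw [List.getD_eq_getElem?_getD] at this
    simp [this]
  rw [h2, pv_countP_range_lt _ _ hle]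

-- B's off-diagonal concatenation counts exactly what A's i ≠ j index scan counts
lemma pv_count_bridge (row : List Int) (q : Int → Bool) (i m : Nat) (him : i < m)
    (H : ∀ j, j < m → j ≠ i → j < row.length) :
    (row.take i ++ (row.drop (i + 1)).take (m - (i + 1))).countP q
      = (List.range m).countP (fun j => decide (i ≠ j) && q (row.getD j 0)) := by
  have hilen : i ≤ row.length := by
    rcases Nat.eq_zero_or_pos i with h | h
    · omega
    · have := H (i - 1) (by omega) (by omega); omega
  have hdlen : m - (i + 1) ≤ (row.drop (i + 1)).length := by
    rcases Nat.lt_or_ge (i + 1) m with h | h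
    · have := H (m - 1) (by omega) (by omega)
      rw [List.length_drop]; omega
    · omega
  rw [List.countP_append, pv_countP_take_range row q i hilen,
      pv_countP_take_range (row.drop (i + 1)) q (m - (i + 1)) hdlen]
  have hgetD : ∀ j, (row.drop (i + 1)).getD j 0 = row.getD (i + 1 + j) 0 := by
    intro j
    rw [List.getD_eq_getElem?_getD, List.getD_eq_getElem?_getD, List.getElem?_drop]
  have hsplit : List.range m = List.range i ++ [i] ++ (List.range (m - (i + 1))).map ((i + 1) + ·) := by
    have h1 : m = (i + 1) + (m - (i + 1)) := by omega
    conv_lhs => rw [h1]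
    rw [List.range_add, List.range_succ]
  rw [hsplit, List.countP_append, List.countP_append, List.countP_map]
  have e1 : (List.range i).countP (fun j => decide (i ≠ j) && q (row.getD j 0))
      = (List.range i).countP (fun j => q (row.getD j 0)) := by
    apply List.countP_congr
    intro j hj
    have : j < i := List.mem_range.mp hj
    have : i ≠ j := by omega
    simp [this]
  have e2 : List.countP (fun j => decide (i ≠ j) && q (row.getD j 0)) [i] = 0 := by
    simp
  have e3 : (List.range (m - (i + 1))).countP ((fun j => decide (i ≠ j) && q (row.getD j 0)) ∘ ((i + 1) + ·))
      = (List.range (m - (i + 1))).countP (fun j => q ((row.drop (i + 1)).getD j 0)) := by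
    apply List.countP_congr
    intro j _
    have : i ≠ i + 1 + j := by omega
    simp [Function.comp, this, hgetD j]
  rw [e1, e2, e3]
  omega

-- A's fused forward scan: returns the largest index attaining the minimum count
lemma pv_sel_forward (k : Nat → Int) :
    ∀ (m : Nat) (c0 f0 : Int), 0 < m → (∀ i, i < m → k i < f0) →
      ∃ r : Nat, r < m ∧ (∀ j, j < m → k r ≤ k j) ∧ (∀ j, j < m → k j = k r → j ≤ r) ∧
        (List.range m).foldl (fun (st : Int × Int) i => if k i ≤ st.2 then ((i : Int), k i) else st) (c0, f0) = ((r : Int), k r) := by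
  intro m
  induction m with
  | zero => intro c0 f0 h; omega
  | succ m ih =>
    intro c0 f0 _ hb
    by_cases hm : m = 0
    · subst hm
      have h0 : k 0 ≤ f0 := le_of_lt (hb 0 (by omega))
      refine ⟨0, by omega, ?_, ?_, ?_⟩
      · intro j hj
        have hj0 : j = 0 := by omega
        subst hj0; exact le_refl _
      · intro j hj _; omega
      · simp [List.range_succ, h0]
    · obtain ⟨r, hr, hmin, hmax, heq⟩ := ih c0 f0 (by omega) (fun i hi => hb i (by omega))
      rw [List.range_succ, List.foldl_append, heq]
      by_cases hc : k m ≤ k r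
      · refine ⟨m, by omega, ?_, ?_, by simp [hc]⟩
        · intro j hj
          rcases Nat.lt_succ_iff_lt_or_eq.mp hj with h | h
          · exact le_trans hc (hmin j h)
          · subst h; rfl
        · intro j hj _; omega
      · refine ⟨r, by omega, ?_, ?_, by simp [hc]⟩
        · intro j hj
          rcases Nat.lt_succ_iff_lt_or_eq.mp hj with h | h
          · exact hmin j h
          · subst h; omega
        · intro j hj hkj
          rcases Nat.lt_succ_iff_lt_or_eq.mp hj with h | h
          · exact hmax j h hkj
          · subst h; omega

-- B's Optional best with lexicographic (count, -i) keys: the same largest-minimal index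
lemma pv_sel_bestkey (k : Nat → Int) :
    ∀ (m : Nat), 0 < m →
      ∃ r : Nat, r < m ∧ (∀ j, j < m → k r ≤ k j) ∧ (∀ j, j < m → k j = k r → j ≤ r) ∧
        (List.range m).foldl (fun (best : Option (Int × Int)) (i : Nat) =>
          match best with
          | none => some (k i, -(i : Int))
          | some b => if k i < b.1 ∨ (k i = b.1 ∧ -(i : Int) < b.2) then some (k i, -(i : Int)) else some b) none
        = some (k r, -(r : Int)) := by
  intro m
  induction m with
  | zero => omega
  | succ m ih =>
    intro _
    by_cases hm : m = 0
    · subst hm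
      exact ⟨0, by omega, by intro j hj; interval_cases j; exact le_refl _, by omega, by simp [List.range_succ]⟩
    · obtain ⟨r, hr, hmin, hmax, heq⟩ := ih (by omega)
      rw [List.range_succ, List.foldl_append, heq]
      simp only [List.foldl_cons, List.foldl_nil]
      have hneg : -(m : Int) < -(r : Int) := by
        have : (r : Int) < (m : Int) := by exact_mod_cast hr
        omega
      by_cases hc : k m ≤ k r
      · have hcond : k m < k r ∨ (k m = k r ∧ -(m : Int) < -(r : Int)) := by
          rcases lt_or_eq_of_le hc with h | h
          · exact Or.inl h
          · exact Or.inr ⟨h, hneg⟩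
        refine ⟨m, by omega, ?_, ?_, by rw [if_pos hcond]⟩
        · intro j hj
          rcases Nat.lt_succ_iff_lt_or_eq.mp hj with h | h
          · exact le_trans hc (hmin j h)
          · subst h; exact le_refl _
        · intro j hj _; omega
      · have hcond : ¬ (k m < k r ∨ (k m = k r ∧ -(m : Int) < -(r : Int))) := by
          rintro (h | ⟨h, _⟩) <;> omega
        refine ⟨r, by omega, ?_, ?_, by rw [if_neg hcond]⟩
        · intro j hj
          rcases Nat.lt_succ_iff_lt_or_eq.mp hj with h | h
          · exact hmin j h
          · subst h; omega
        · intro j hj hkj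
          rcases Nat.lt_succ_iff_lt_or_eq.mp hj with h | h
          · exact hmax j h hkj
          · subst h; omega

-- ===== VERDICT =====
theorem get_city_with_fewest_reachable_spec : Claim_equal_get_city_with_fewest_reachable := by
  intro n sm dt _ hpre
  unfold Spec_get_city_with_fewest_reachable
  by_cases hn : n ≤ 0
  · have hr : PySem.List.pyRange 0 n 1 = [] := PySem.List.pyRange_one_eq_nil hn
    simp [get_city_with_fewest_reachable, get_city_with_fewest_reachable_alt, hr]
  · have hpre' : n ≤ (sm.length : Int)
        ∧ (∀ row ∈ sm.take (n.toNat - 1), n ≤ (row.length : Int))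
        ∧ n - 1 ≤ ((sm.getD (n.toNat - 1) []).length : Int) := by
      rcases hpre with h | h
      · omega
      · exact h
    obtain ⟨hlen, hrows, hlast⟩ := hpre'
    set m := n.toNat with hmdef
    have hnm : n = (m : Int) := by omega
    have hm0 : 0 < m := by omega
    have hlen' : m ≤ sm.length := by omega
    -- every off-diagonal index A touches is inside the row
    have H : ∀ i, i < m → ∀ j, j < m → j ≠ i → j < (sm.getD i []).length := by
      intro i hi j hj hne
      have hism : i < sm.length := by omega
      by_cases hilast : i = m - 1
      · subst hilast
        omega
      · have hi' : i < m - 1 := by omega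
        have hit : i < (sm.take (m - 1)).length := by
          rw [List.length_take]; omega
        have hrowmem : sm.getD i [] ∈ sm.take (m - 1) := by
          rw [List.getD_eq_getElem sm [] hism]
          have ht : (sm.take (m - 1))[i]'hit = sm[i]'hism := List.getElem_take
          rw [← ht]
          exact List.getElem_mem hit
        have := hrows _ hrowmem
        omega
    set k : Nat → Int := fun i =>
      (((List.range m).countP (fun j => decide (i ≠ j) && decide ((sm.getD i []).getD j 0 ≤ dt))
        : Nat) : Int) with hkdef
    -- bound: every count is < n
    have hbound : ∀ i, i < m → k i < ((m : Nat) : Int) := by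
      intro i hi
      have h1 : (List.range m).countP
          (fun j => decide (i ≠ j) && decide ((sm.getD i []).getD j 0 ≤ dt)) ≤ m := by
        simpa using List.countP_le_length (l := List.range m)
      have h2 : (List.range m).countP
          (fun j => decide (i ≠ j) && decide ((sm.getD i []).getD j 0 ≤ dt)) ≠ m := by
        intro hcontra
        have := List.countP_eq_length.mp (by simpa using hcontra) i (List.mem_range.mpr hi)
        simp at this
      have h3 : (List.range m).countP
          (fun j => decide (i ≠ j) && decide ((sm.getD i []).getD j 0 ≤ dt)) < m := by omega
      rw [hkdef]
      change (((List.range m).countP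
          (fun j => decide (i ≠ j) && decide ((sm.getD i []).getD j 0 ≤ dt)) : Nat) : Int)
        < ((m : Nat) : Int)
      exact_mod_cast h3
    obtain ⟨rA, hrAm, hminA, hmaxA, heqA⟩ := pv_sel_forward k m (-1) ((m : Nat) : Int) hm0 hbound
    -- A's value
    have hAval : get_city_with_fewest_reachable n sm dt = (rA : Int) := by
      have hA0 : get_city_with_fewest_reachable n sm dt = ((PySem.List.pyRange 0 n 1).foldl
          (fun (st : Int × Int) (i : Int) =>
            let reachable_count : Int := (PySem.List.pyRange 0 n 1).foldl
              (fun acc j => if i ≠ j ∧ PySem.List.pyGetD (PySem.List.pyGetD sm i []) j 0 ≤ dt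
                then acc + 1 else acc) 0
            if reachable_count ≤ st.2 ∧ 1 + 1 = 2 then (i, reachable_count) else st) (-1, n)).1 := rfl
      rw [hA0, hnm, PySem.List.pyRange_zero_natCast]
      simp only [List.foldl_map]
      have hcong : ∀ (acc : Int × Int), ∀ i ∈ List.range m,
          (fun (st : Int × Int) (i : Nat) =>
            if (List.range m).foldl
                (fun acc j => if ((i : Nat) : Int) ≠ ((j : Nat) : Int) ∧
                  PySem.List.pyGetD (PySem.List.pyGetD sm ((i : Nat) : Int) []) ((j : Nat) : Int) 0 ≤ dt
                  then acc + 1 else acc) 0 ≤ st.2 ∧ True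
            then (((i : Nat) : Int), (List.range m).foldl
                (fun acc j => if ((i : Nat) : Int) ≠ ((j : Nat) : Int) ∧
                  PySem.List.pyGetD (PySem.List.pyGetD sm ((i : Nat) : Int) []) ((j : Nat) : Int) 0 ≤ dt
                  then acc + 1 else acc) 0)
            else st) acc i
          = (fun (st : Int × Int) (i : Nat) => if k i ≤ st.2 then (((i : Nat) : Int), k i) else st) acc i := by
        intro acc i _
        have hcnt : (List.range m).countP
              (fun j => decide (((i : Nat) : Int) ≠ ((j : Nat) : Int) ∧
                PySem.List.pyGetD (PySem.List.pyGetD sm ((i : Nat) : Int) []) ((j : Nat) : Int) 0 ≤ dt))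
            = (List.range m).countP (fun j => decide (i ≠ j) && decide ((sm.getD i []).getD j 0 ≤ dt)) := by
          apply List.countP_congr
          intro j _
          simp [PySem.List.pyGetD_natCast]
        have hinner : (List.range m).foldl
            (fun acc j => if ((i : Nat) : Int) ≠ ((j : Nat) : Int) ∧
              PySem.List.pyGetD (PySem.List.pyGetD sm ((i : Nat) : Int) []) ((j : Nat) : Int) 0 ≤ dt
              then acc + 1 else acc) 0 = k i := by
          rw [PySem.List.foldl_ite_add_one (fun j : Nat => ((i : Nat) : Int) ≠ ((j : Nat) : Int) ∧
            PySem.List.pyGetD (PySem.List.pyGetD sm ((i : Nat) : Int) []) ((j : Nat) : Int) 0 ≤ dt)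
            (List.range m) 0]
          rw [zero_add, hcnt, hkdef]
        simp only []
        rw [hinner]
        norm_num
      rw [PySem.List.foldl_congr_mem (List.range m) _
        (fun (st : Int × Int) (i : Nat) => if k i ≤ st.2 then (((i : Nat) : Int), k i) else st)
        ((-1 : Int), ((m : Nat) : Int)) hcong, heqA]
    -- B's per-city key equals A's count
    set κ : Nat → Int := fun i =>
      ((pvUB (PySem.List.sorted
          (PySem.List.slice (PySem.List.pyGetD sm ((i : Nat) : Int) []) none (some ((i : Nat) : Int))
            ++ PySem.List.slice (PySem.List.pyGetD sm ((i : Nat) : Int) []) (some (((i : Nat) : Int) + 1)) (some ((m : Nat) : Int)))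
          (fun x => x) false) dt 0
        (PySem.List.sorted
          (PySem.List.slice (PySem.List.pyGetD sm ((i : Nat) : Int) []) none (some ((i : Nat) : Int))
            ++ PySem.List.slice (PySem.List.pyGetD sm ((i : Nat) : Int) []) (some (((i : Nat) : Int) + 1)) (some ((m : Nat) : Int)))
          (fun x => x) false).length : Nat) : Int) with hκdef
    have hkey : ∀ i, i < m → κ i = k i := by
      intro i hi
      have hrow : PySem.List.pyGetD sm ((i : Nat) : Int) [] = sm.getD i [] :=
        PySem.List.pyGetD_natCast sm i []
      have hs1 : PySem.List.slice (sm.getD i []) none (some ((i : Nat) : Int)) = (sm.getD i []).take i :=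
        PySem.List.slice_to_natCast (sm.getD i []) i
      have hs2 : PySem.List.slice (sm.getD i []) (some (((i : Nat) : Int) + 1)) (some ((m : Nat) : Int))
          = ((sm.getD i []).drop (i + 1)).take (m - (i + 1)) := by
        have hcast : ((i : Nat) : Int) + 1 = (((i + 1 : Nat)) : Int) := by push_cast; ring
        rw [hcast, PySem.List.slice_natCast]
      have hpairκ : (PySem.List.sorted ((sm.getD i []).take i ++ ((sm.getD i []).drop (i + 1)).take (m - (i + 1))) (fun x => x) false).Pairwise (· ≤ ·) := by
        have := PySem.List.sorted_pairwise
          (xs := (sm.getD i []).take i ++ ((sm.getD i []).drop (i + 1)).take (m - (i + 1)))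
          (key := fun x => x)
        simpa using this
      have hperm : (PySem.List.sorted ((sm.getD i []).take i ++ ((sm.getD i []).drop (i + 1)).take (m - (i + 1))) (fun x => x) false).Perm
          ((sm.getD i []).take i ++ ((sm.getD i []).drop (i + 1)).take (m - (i + 1))) :=
        PySem.List.sorted_perm ..
      rw [hκdef]
      simp only [hrow, hs1, hs2]
      rw [pv_pvUB_count _ dt hpairκ]
      rw [hperm.countP_eq]
      rw [pv_count_bridge (sm.getD i []) (fun y => decide (y ≤ dt)) i m hi (H i hi)]
    obtain ⟨r, hrm, hminB, hmaxB, heqB⟩ := pv_sel_bestkey κ m hm0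
    -- B's value
    have hBval : get_city_with_fewest_reachable_alt n sm dt = (r : Int) := by
      simp only [get_city_with_fewest_reachable_alt]
      rw [hnm, PySem.List.pyRange_zero_natCast]
      simp only [List.foldl_map]
      exact Eq.trans
        (congrArg (fun z : Option (Int × Int) => match z with | none => (-1 : Int) | some b => -b.2) heqB)
        (by simp)
    -- uniqueness: both scans return the largest index attaining the minimum count
    have hminB' : ∀ j, j < m → k r ≤ k j := by
      intro j hj
      have := hminB j hj
      rwa [hkey r hrm, hkey j hj] at this
    have hmaxB' : ∀ j, j < m → k j = k r → j ≤ r := by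
      intro j hj hkj
      exact hmaxB j hj (by rw [hkey j hj, hkey r hrm]; exact hkj)
    have hkeq : k rA = k r := le_antisymm (hminA r hrm) (hminB' rA hrAm)
    have h1 : rA ≤ r := hmaxB' rA hrAm hkeq
    have h2 : r ≤ rA := hmaxA r hrm hkeq.symm
    have hreq : rA = r := le_antisymm h1 h2
    rw [hAval, hBval, hreq]
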